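-- pv_equiv track=rewrite | github.com/balwantsinghmnit/selected_topics_in_cryptography-STC-Lab | lab2/lab2.py | checkthree
-- ===== SOURCE A (Python) =====
-- import string
--
-- lower = string.ascii_lowercase
--
-- three  = ["the", "and", "for", "are", "but", "not", "you", "all", "any", "can", "had", "her", "was", "one", "our", "out", "day", "get", "has", "him", "his", "how", "man", "new", "now", "old", "see", "two", "way", "who", "boy", "did", "its", "let", "put", "say", "she", "too", "use"]
--
-- def con(n):
-- 	if n<0:
-- 		return(26+n)
-- 	else:
-- 		return n
--
-- def checkthree(s):
-- 	i1 = lower.index(s[0])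
-- 	i2 = lower.index(s[1])
-- 	i3 = lower.index(s[2])
-- 	for i in range(len(three)):
-- 		d1 = lower.index(three[i][0])
-- 		d2 = lower.index(three[i][1])
-- 		d3 = lower.index(three[i][2])
-- 		if con(d1-d2)==con(i1-i2) and con(d2-d3)==con(i2-i3) and con(d1-d3)==con(i1-i3):
-- 			return(max(d1-i1,i1-d1))
-- 	return(0)
-- ===== SOURCE B (Python) =====
-- import string
--
-- lower = string.ascii_lowercase
--
-- three = ["the", "and", "for", "are", "but", "not", "you", "all", "any", "can", "had", "her", "was", "one", "our", "out", "day", "get", "has", "him", "his", "how", "man", "new", "now", "old", "see", "two", "way", "who", "boy", "did", "its", "let", "put", "say", "she", "too", "use"]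
--
-- def con(n):
--     if n < 0:
--         return 26 + n
--     else:
--         return n
--
-- def _sig(w):
--     d1 = lower.index(w[0])
--     d2 = lower.index(w[1])
--     d3 = lower.index(w[2])
--     return (con(d1 - d2), con(d2 - d3), con(d1 - d3)), d1
--
-- _table = {}
-- for _w in three:
--     _k, _d1 = _sig(_w)
--     _table.setdefault(_k, _d1)
--
-- def checkthree(s):
--     i1 = lower.index(s[0])
--     i2 = lower.index(s[1])
--     i3 = lower.index(s[2])
--     d1 = _table.get((con(i1 - i2), con(i2 - i3), con(i1 - i3)))
--     return 0 if d1 is None else abs(d1 - i1)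
-- ===== Notes on version B (the rewrite author's own statement) =====
-- stated objective: alternative
-- what changed: Replaces the per-call scan over the word list with a signature dictionary precomputed once (setdefault keeps first-occurrence-wins), so each call is three index lookups plus one dict lookup.
import Mathlib
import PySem

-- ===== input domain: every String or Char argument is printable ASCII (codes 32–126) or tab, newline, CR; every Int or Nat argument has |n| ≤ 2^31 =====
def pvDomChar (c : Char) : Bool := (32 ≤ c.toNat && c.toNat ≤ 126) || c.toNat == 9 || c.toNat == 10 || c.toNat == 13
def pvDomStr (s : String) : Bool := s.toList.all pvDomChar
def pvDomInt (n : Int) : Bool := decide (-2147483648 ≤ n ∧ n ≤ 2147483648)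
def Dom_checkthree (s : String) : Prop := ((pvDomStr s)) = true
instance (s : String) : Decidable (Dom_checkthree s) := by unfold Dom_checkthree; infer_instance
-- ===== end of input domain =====

-- B replaces A's per-call scan of the word list by a one-time signature→first-letter table with a single lookup per call (alternative decomposition, same results).

-- ===== PORT A =====
-- shared helpers (module-level constants and `con` of the Python file)
def lowerL : List Char := ['a','b','c','d','e','f','g','h','i','j','k','l','m','n','o','p','q','r','s','t','u','v','w','x','y','z']

def threeW : List String := ["the", "and", "for", "are", "but", "not", "you", "all", "any", "can", "had", "her", "was", "one", "our", "out", "day", "get", "has", "him", "his", "how", "man", "new", "now", "old", "see", "two", "way", "who", "boy", "did", "its", "let", "put", "say", "she", "too", "use"]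

def con (n : Int) : Int := if n < 0 then 26 + n else n

-- lower.index(w[k]) for the word-list literals (both raises are unreachable on the literal list; outside Pre_ nothing is claimed)
def widx (w : String) (k : Int) : Int :=
  match PySem.Str.pyGet? w k with
  | some c => ((PySem.List.index? lowerL c).getD 0 : Nat)
  | none => 0

-- the `for i in range(len(three))` loop of A with its early return
def chA (i1 i2 i3 : Int) : List String → Int
  | [] => 0
  | w :: rest =>
    let d1 := widx w 0
    let d2 := widx w 1
    let d3 := widx w 2
    if con (d1 - d2) = con (i1 - i2) ∧ con (d2 - d3) = con (i2 - i3) ∧ con (d1 - d3) = con (i1 - i3) then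
      max (d1 - i1) (i1 - d1)
    else
      chA i1 i2 i3 rest

def checkthree (s : String) : Int :=
  match PySem.Str.pyGet? s 0, PySem.Str.pyGet? s 1, PySem.Str.pyGet? s 2 with
  | some a, some b, some c =>
    match PySem.List.index? lowerL a, PySem.List.index? lowerL b, PySem.List.index? lowerL c with
    | some i1, some i2, some i3 => chA (i1 : Int) (i2 : Int) (i3 : Int) threeW
    | _, _, _ => 0  -- lower.index raised ValueError: outside Pre_
  | _, _, _ => 0    -- s[k] raised IndexError: outside Pre_

-- ===== PORT B =====
-- _sig(w) of Source B: the difference signature of a word together with its first-letter index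
def sigd (w : String) : (Int × Int × Int) × Int :=
  let d1 := widx w 0
  let d2 := widx w 1
  let d3 := widx w 2
  ((con (d1 - d2), con (d2 - d3), con (d1 - d3)), d1)

-- the module-level table build of Source B (setdefault: first occurrence wins)
def bTable : PySem.Dict (Int × Int × Int) Int :=
  threeW.foldl (fun t w => t.setdefault (sigd w).1 (sigd w).2) PySem.Dict.empty

def checkthree_alt (s : String) : Int :=
  match PySem.Str.pyGet? s 0 with
  | none => 0      -- s[0] raised IndexError: outside Pre_
  | some a =>
  match PySem.Str.pyGet? s 1 with
  | none => 0
  | some b =>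
  match PySem.Str.pyGet? s 2 with
  | none => 0
  | some c =>
  match PySem.List.index? lowerL a with
  | none => 0      -- lower.index raised ValueError: outside Pre_
  | some i1 =>
  match PySem.List.index? lowerL b with
  | none => 0
  | some i2 =>
  match PySem.List.index? lowerL c with
  | none => 0
  | some i3 =>
  match bTable.get? (con ((i1 : Int) - i2), con ((i2 : Int) - i3), con ((i1 : Int) - i3)) with
  | some d1 => |d1 - (i1 : Int)|
  | none => 0

-- ===== PRECONDITION & SPEC =====
-- Pre_ excludes exactly the inputs where the Python raises: strings shorter than 3 (IndexError) or whose first three characters are not lowercase ASCII letters (ValueError).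
def Pre_checkthree (s : String) : Prop :=
  3 ≤ s.toList.length ∧ (s.toList.take 3).all (fun c => 97 ≤ c.toNat && c.toNat ≤ 122) = true

instance (s : String) : Decidable (Pre_checkthree s) := by unfold Pre_checkthree; infer_instance

def pvWitness_checkthree : String := "abc"

def Spec_checkthree (s : String) (out : Int) : Prop := out = checkthree_alt s
instance (s : String) (out : Int) : Decidable (Spec_checkthree s out) := by unfold Spec_checkthree; infer_instance

-- ===== CLAIM (what is proved, stated in full; the proofs are below) =====
def Claim_equal_checkthree : Prop := ∀ (s : String), Dom_checkthree s → Pre_checkthree s → Spec_checkthree s (checkthree s)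

-- ===== LEMMAS AND PROOFS =====

def sigOfIdx (i1 i2 i3 : Int) : Int × Int × Int := (con (i1 - i2), con (i2 - i3), con (i1 - i3))

-- a setdefault-fold table looks up as: current table first, then first matching word
theorem tbl_get (ws : List String) (t : PySem.Dict (Int × Int × Int) Int) (k : Int × Int × Int) :
    (ws.foldl (fun t w => t.setdefault (sigd w).1 (sigd w).2) t).get? k
      = (t.get? k).or (ws.findSome? (fun w => if (sigd w).1 = k then some (sigd w).2 else none)) := by
  induction ws generalizing t with
  | nil => simp
  | cons w ws ih =>
    simp only [List.foldl_cons, List.findSome?_cons, ih]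
    have h : (t.setdefault (sigd w).1 (sigd w).2).get? k
        = (t.get? k).or (if (sigd w).1 = k then some (sigd w).2 else none) := by
      by_cases hk : k = (sigd w).1
      · subst hk
        rw [PySem.Dict.get?_setdefault_self]
        cases t.get? (sigd w).1 <;> simp
      · rw [PySem.Dict.get?_setdefault_of_ne t (sigd w).2 hk]
        have : ((sigd w).1 = k) = False := by simp [Ne.symm hk]
        simp [this]
    rw [h]
    cases hfw : (if (sigd w).1 = k then some (sigd w).2 else none) <;>
      cases t.get? k <;> simp [Option.or]

-- A's scan loop computes exactly the first-match lookup
theorem chA_eq (i1 i2 i3 : Int) (ws : List String) :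
    chA i1 i2 i3 ws
      = match ws.findSome? (fun w => if (sigd w).1 = sigOfIdx i1 i2 i3 then some (sigd w).2 else none) with
        | some d1 => |d1 - i1|
        | none => 0 := by
  induction ws with
  | nil => rfl
  | cons w ws ih =>
    simp only [chA, List.findSome?_cons]
    by_cases hc : con (widx w 0 - widx w 1) = con (i1 - i2) ∧
        con (widx w 1 - widx w 2) = con (i2 - i3) ∧ con (widx w 0 - widx w 2) = con (i1 - i3)
    · have habs : max (widx w 0 - i1) (i1 - widx w 0) = |widx w 0 - i1| := by
        rw [abs_sub_comm, abs_eq_max_neg]; omega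
      simp [hc, habs, sigd, sigOfIdx]
    · simp [hc, ih, sigd, sigOfIdx]

-- ===== VERDICT (by name: the statement is the Claim_ definition above) =====
-- the core equality for successfully extracted indices
theorem core_eq (i1 i2 i3 : Nat) :
    chA (i1 : Int) (i2 : Int) (i3 : Int) threeW
      = match bTable.get? (con ((i1 : Int) - i2), con ((i2 : Int) - i3), con ((i1 : Int) - i3)) with
        | some d1 => |d1 - (i1 : Int)|
        | none => 0 := by
  rw [chA_eq]
  unfold bTable
  rw [tbl_get]
  simp only [PySem.Dict.get?_empty, Option.none_or, sigOfIdx]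
  congr 1

set_option maxRecDepth 8000 in
theorem checkthree_spec : Claim_equal_checkthree := by
  intro s _ _
  unfold Spec_checkthree checkthree checkthree_alt
  cases PySem.Str.pyGet? s 0 <;> cases PySem.Str.pyGet? s 1 <;> cases PySem.Str.pyGet? s 2 <;>
    try rfl
  rename_i a b c
  show (match PySem.List.index? lowerL a, PySem.List.index? lowerL b, PySem.List.index? lowerL c with
        | some i1, some i2, some i3 => chA (i1 : Int) (i2 : Int) (i3 : Int) threeW
        | _, _, _ => 0)
      = (match PySem.List.index? lowerL a with
        | none => 0
        | some i1 =>
        match PySem.List.index? lowerL b with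
        | none => 0
        | some i2 =>
        match PySem.List.index? lowerL c with
        | none => 0
        | some i3 =>
        match bTable.get? (con ((i1 : Int) - i2), con ((i2 : Int) - i3), con ((i1 : Int) - i3)) with
        | some d1 => |d1 - (i1 : Int)|
        | none => 0)
  cases PySem.List.index? lowerL a <;> cases PySem.List.index? lowerL b <;>
    cases PySem.List.index? lowerL c <;> try rfl
  rename_i i1 i2 i3
  exact core_eq i1 i2 i3
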